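-- pv_equiv track=rewrite | github.com/balhaddad-sys/shifu-ocr | test_arc.py | apply_gravity_dir
-- ===== SOURCE A (Python) =====
-- from collections import Counter, deque
-- from typing import List, Tuple, Optional, Dict, Set, Callable
--
-- Grid = List[List[int]]
--
-- def dims(g: Grid) -> Tuple[int, int]:
--     return len(g), len(g[0]) if g else 0
--
-- def make(rows: int, cols: int, fill: int = 0) -> Grid:
--     return [[fill] * cols for _ in range(rows)]
--
-- def color_counts(g: Grid) -> Dict[int, int]:
--     ct = Counter()
--     for row in g:
--         for v in row:
--             ct[v] += 1
--     return dict(ct)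
--
-- def background(g: Grid) -> int:
--     """Most common color = background."""
--     ct = color_counts(g)
--     return max(ct, key=ct.get)
--
-- def apply_gravity_dir(inp: Grid, direction: str) -> Grid:
--     rows, cols = dims(inp)
--     bg = background(inp)
--     out = make(rows, cols, bg)
--
--     if direction == 'down':
--         for c in range(cols):
--             non_bg = [inp[r][c] for r in range(rows) if inp[r][c] != bg]
--             for i, v in enumerate(non_bg):
--                 out[rows - len(non_bg) + i][c] = v
--     elif direction == 'up':
--         for c in range(cols):
--             non_bg = [inp[r][c] for r in range(rows) if inp[r][c] != bg]
--             for i, v in enumerate(non_bg):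
--                 out[i][c] = v
--     elif direction == 'right':
--         for r in range(rows):
--             non_bg = [inp[r][c] for c in range(cols) if inp[r][c] != bg]
--             for i, v in enumerate(non_bg):
--                 out[r][cols - len(non_bg) + i] = v
--     elif direction == 'left':
--         for r in range(rows):
--             non_bg = [inp[r][c] for c in range(cols) if inp[r][c] != bg]
--             for i, v in enumerate(non_bg):
--                 out[r][i] = v
--     return out
-- ===== SOURCE B (Python) =====
-- from collections import Counter
-- from typing import List
--
-- Grid = List[List[int]]
--
-- def background(g: Grid) -> int:
--     """Most common color = background (same tie-break as A: first-seen wins)."""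
--     ct = Counter()
--     for row in g:
--         for v in row:
--             ct[v] += 1
--     ct = dict(ct)
--     return max(ct, key=ct.get)
--
-- def _transpose(g: Grid) -> Grid:
--     return [[row[c] for row in g] for c in range(len(g[0]) if g else 0)]
--
-- def apply_gravity_dir(inp: Grid, direction: str) -> Grid:
--     bg = background(inp)
--     w = len(inp[0]) if inp else 0   # nominal grid width = first row's width (as dims() reads it)
--
--     def slide(line):
--         kept = [v for v in line if v != bg]
--         return kept + [bg] * (len(line) - len(kept))
--
--     if direction == 'left':
--         return [slide(row[:w]) for row in inp]
--     if direction == 'right':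
--         return [slide(row[:w][::-1])[::-1] for row in inp]
--     if direction == 'up':
--         return _transpose([slide(col) for col in _transpose(inp)])
--     if direction == 'down':
--         return _transpose([slide(col[::-1])[::-1] for col in _transpose(inp)])
--     return [[bg] * w for _ in inp]
-- ===== Notes on version B (the rewrite author's own statement) =====
-- stated objective: alternative
-- what changed: Replaces the four direction-specific index-scatter loops (building a bg canvas and writing non-bg cells at computed offsets) with one slide-a-line helper applied through reverse/transpose normalizations of the grid.
-- outside the precondition, e.g. on apply_gravity_dir([[], [1]], 'down'): A returns [[], []], B returns []; on apply_gravity_dir([], 'down'): A raises ValueError, B raises ValueError; on apply_gravity_dir([[1, 2], [3]], 'left'): A raises IndexError, B returns [[2, 1], [3]]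
import Mathlib
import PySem

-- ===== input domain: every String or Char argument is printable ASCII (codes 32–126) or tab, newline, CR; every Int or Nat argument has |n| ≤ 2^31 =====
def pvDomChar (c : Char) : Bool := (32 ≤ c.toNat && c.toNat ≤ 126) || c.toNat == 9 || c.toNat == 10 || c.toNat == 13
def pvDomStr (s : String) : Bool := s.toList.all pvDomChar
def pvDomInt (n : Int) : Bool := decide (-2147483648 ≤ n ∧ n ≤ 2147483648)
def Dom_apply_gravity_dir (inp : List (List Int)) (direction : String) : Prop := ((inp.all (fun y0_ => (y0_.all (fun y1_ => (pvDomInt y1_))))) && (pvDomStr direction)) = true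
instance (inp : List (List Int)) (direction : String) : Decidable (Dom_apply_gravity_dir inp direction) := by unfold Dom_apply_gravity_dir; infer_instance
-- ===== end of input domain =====

-- B re-implements the four gravity scatter loops as one slide-a-line helper composed
-- with reverse/transpose normalizations (objective: alternative decomposition, same cost).

-- ===== PORT A =====

-- color_counts: Counter over all cells, row-major
def colorCounts (g : List (List Int)) : PySem.Dict Int Int :=
  g.foldl (fun ct row => row.foldl (fun ct v => ct.modify v 0 (· + 1)) ct) PySem.Dict.empty

-- background: max(ct, key=ct.get); none exactly when the grid has no cells (Python ValueError)
def backgroundA (g : List (List Int)) : Option Int :=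
  let ct := colorCounts g
  PySem.List.max? ct.keys (fun k => ct.getD k 0)

-- len(g[0]) if g else 0  (dims' column count)
def colsOf (g : List (List Int)) : Nat :=
  match g with
  | [] => 0
  | r :: _ => r.length

-- 'for i, v in enumerate(non_bg): out[r][pos0+i] = v' — one row, position advances each step
def setRun (row : List Int) (pos : Nat) (vals : List Int) : List Int :=
  match vals with
  | [] => row
  | v :: vs => setRun (row.set pos v) (pos + 1) vs

-- 'for i, v in enumerate(non_bg): out[pos0+i][c] = v' — one column, row index advances
def setCol (out : List (List Int)) (c : Nat) (pos : Nat) (vals : List Int) : List (List Int) :=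
  match vals with
  | [] => out
  | v :: vs => setCol (out.modify pos (fun row => row.set c v)) c (pos + 1) vs

-- In-range indexing inp[r][c] is ported with getD (exact inside Pre_, where all indices hit).
def apply_gravity_dir (inp : List (List Int)) (direction : String) : List (List Int) :=
  let rows := inp.length
  let cols := colsOf inp
  let bg := (backgroundA inp).getD 0   -- getD unreached inside Pre_ (background raises only on cell-less grids)
  let out := List.replicate rows (List.replicate cols bg)
  if direction == "down" then
    (List.range cols).foldl (fun out c =>
      let non_bg := ((List.range rows).map (fun r => (inp.getD r []).getD c 0)).filter (fun v => v != bg)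
      setCol out c (rows - non_bg.length) non_bg) out
  else if direction == "up" then
    (List.range cols).foldl (fun out c =>
      let non_bg := ((List.range rows).map (fun r => (inp.getD r []).getD c 0)).filter (fun v => v != bg)
      setCol out c 0 non_bg) out
  else if direction == "right" then
    (List.range rows).foldl (fun out r =>
      let non_bg := ((List.range cols).map (fun c => (inp.getD r []).getD c 0)).filter (fun v => v != bg)
      out.modify r (fun row => setRun row (cols - non_bg.length) non_bg)) out
  else if direction == "left" then
    (List.range rows).foldl (fun out r =>
      let non_bg := ((List.range cols).map (fun c => (inp.getD r []).getD c 0)).filter (fun v => v != bg)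
      out.modify r (fun row => setRun row 0 non_bg)) out
  else out

-- ===== PORT B =====

-- slide: non-bg entries first, bg padding after
def slideB (bg : Int) (line : List Int) : List Int :=
  let kept := line.filter (fun v => v != bg)
  kept ++ List.replicate (line.length - kept.length) bg

-- _transpose: [[row[c] for row in g] for c in range(len(g[0]) if g else 0)]  (row[c] in range inside Pre_)
def transposeB (g : List (List Int)) : List (List Int) :=
  (List.range (colsOf g)).map (fun c => g.map (fun row => row.getD c 0))

-- row[::-1] is List.reverse (PySem.List.slice?_none_none_neg_one);
-- row[:w] is ported with PySem.List.slice (w = colsOf inp, the nominal width)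
def apply_gravity_dir_alt (inp : List (List Int)) (direction : String) : List (List Int) :=
  let bg := (backgroundA inp).getD 0   -- same background() helper as A
  let w := colsOf inp
  if direction == "left" then
    inp.map (fun row => slideB bg (PySem.List.slice row none (some (w : Int))))
  else if direction == "right" then
    inp.map (fun row => (slideB bg (PySem.List.slice row none (some (w : Int))).reverse).reverse)
  else if direction == "up" then
    transposeB ((transposeB inp).map (fun col => slideB bg col))
  else if direction == "down" then
    transposeB ((transposeB inp).map (fun col => (slideB bg col.reverse).reverse))
  else
    inp.map (fun _ => List.replicate w bg)

-- ===== PRECONDITION & SPEC =====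

-- Pre_ requires a grid with at least one cell (else A's background() raises ValueError), rows
-- no shorter than the first row for the four real directions (else A raises IndexError), and a
-- nonempty first row for 'up'/'down', where on a grid with an empty first row but cells
-- elsewhere A's zero-width canvas shape is anybody's choice (B returns the 0-width transpose).
def Pre_apply_gravity_dir (inp : List (List Int)) (direction : String) : Prop :=
  inp ≠ [] ∧ (∃ row ∈ inp, row ≠ []) ∧
    ((direction = "down" ∨ direction = "up" ∨ direction = "right" ∨ direction = "left") →
      ∀ row ∈ inp, (inp.headD []).length ≤ row.length) ∧
    ((direction = "down" ∨ direction = "up") → inp.headD [] ≠ [])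
instance (inp : List (List Int)) (direction : String) : Decidable (Pre_apply_gravity_dir inp direction) := by
  unfold Pre_apply_gravity_dir; infer_instance

def pvWitness_apply_gravity_dir : List (List Int) × String := ([[1, 0, 2], [0, 0, 3]], "down")

def Spec_apply_gravity_dir (inp : List (List Int)) (direction : String) (out : List (List Int)) : Prop := out = apply_gravity_dir_alt inp direction
instance (inp : List (List Int)) (direction : String) (out : List (List Int)) : Decidable (Spec_apply_gravity_dir inp direction out) := by unfold Spec_apply_gravity_dir; infer_instance

-- ===== CLAIM (what is proved, stated in full; the proofs are below) =====
def Claim_equal_apply_gravity_dir : Prop := ∀ (inp : List (List Int)) (direction : String), Dom_apply_gravity_dir inp direction → Pre_apply_gravity_dir inp direction → Spec_apply_gravity_dir inp direction (apply_gravity_dir inp direction)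

-- ===== LEMMAS AND PROOFS =====

-- [xs.getD i d for i in range(len(xs))] is xs itself
theorem map_getD_range {α : Type} (xs : List α) (d : α) :
    (List.range xs.length).map (fun i => xs.getD i d) = xs := by
  apply List.ext_getElem
  · simp
  · intro i h1 h2
    simp [List.getElem?_eq_getElem h2]

theorem map_getD_range_take {α : Type} (xs : List α) (d : α) (n : Nat) (h : n ≤ xs.length) :
    (List.range n).map (fun i => xs.getD i d) = xs.take n := by
  apply List.ext_getElem
  · simp; omega
  · intro i h1 h2
    have hi : i < n := by simpa using h1
    simp [List.getElem?_eq_getElem (show i < xs.length by omega)]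

theorem map_getD_range_comp {α β : Type} (xs : List α) (d : α) (G : α → β) :
    (List.range xs.length).map (fun i => G (xs.getD i d)) = xs.map G := by
  conv_rhs => rw [← map_getD_range xs d, List.map_map]
  rfl

theorem colsOf_eq (g : List (List Int)) : colsOf g = (g.headD []).length := by
  cases g <;> rfl

theorem colsOf_map_range (m : Nat) (h : 0 < m) (g : Nat → List Int) :
    colsOf ((List.range m).map g) = (g 0).length := by
  cases m with
  | zero => omega
  | succ m => rw [List.range_succ_eq_map]; rfl

theorem mapIdx_id' {α : Type} (g : List α) (f : Nat → α → α)
    (h : ∀ i (hi : i < g.length), f i g[i] = g[i]) : g.mapIdx f = g := by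
  apply List.ext_getElem
  · simp
  · intro i h1 h2
    simp only [List.getElem_mapIdx]
    exact h i (by simpa using h1)

theorem setRun_eq (vals : List Int) : ∀ (row : List Int) (pos : Nat),
    pos + vals.length ≤ row.length →
    setRun row pos vals = row.take pos ++ vals ++ row.drop (pos + vals.length) := by
  induction vals with
  | nil => intro row pos h; simp [setRun]
  | cons v vs ih =>
    intro row pos h
    simp only [List.length_cons] at h
    have hlt : pos < row.length := by omega
    have hset : row.set pos v = row.take pos ++ v :: row.drop (pos + 1) := by
      rw [List.set_eq_take_append_cons_drop]; simp [hlt]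
    rw [setRun, ih (row.set pos v) (pos + 1) (by simp; omega), hset]
    have hlen : (row.take pos).length = pos := by simp; omega
    have t1 : (row.take pos ++ v :: row.drop (pos + 1)).take (pos + 1) = row.take pos ++ [v] := by
      rw [List.take_append, hlen, List.take_take]
      have e1 : pos + 1 - pos = 1 := by omega
      have e2 : min (pos + 1) pos = pos := by omega
      rw [e1, e2]
      simp
    have t2 : (row.take pos ++ v :: row.drop (pos + 1)).drop (pos + 1 + vs.length) = row.drop (pos + 1 + vs.length) := by
      rw [List.drop_append, hlen]
      have e1 : pos + 1 + vs.length - pos = vs.length + 1 := by omega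
      rw [e1]
      have e3 : (row.take pos).drop (pos + 1 + vs.length) = [] := by
        apply List.drop_eq_nil_of_le; simp; omega
      rw [e3, List.drop_succ_cons, List.drop_drop]
      simp [Nat.add_comm]
    have e5 : pos + 1 + vs.length = pos + (vs.length + 1) := by omega
    rw [e5] at t2 ⊢
    rw [t1, t2]
    simp

theorem setCol_eq (vals : List Int) : ∀ (g : List (List Int)) (c pos : Nat),
    setCol g c pos vals = g.mapIdx (fun r row =>
      if pos ≤ r ∧ r < pos + vals.length then row.set c (vals.getD (r - pos) 0) else row) := by
  induction vals with
  | nil =>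
    intro g c pos
    rw [setCol]
    symm
    apply mapIdx_id'
    intro i hi
    rw [if_neg (by simp only [List.length_nil]; omega)]
  | cons v vs ih =>
    intro g c pos
    rw [setCol, ih]
    apply List.ext_getElem
    · simp
    · intro i h1 h2
      simp only [List.getElem_mapIdx, List.getElem_modify, List.length_cons]
      by_cases hC : pos ≤ i ∧ i < pos + (vs.length + 1)
      · rw [if_pos hC]
        by_cases hp : pos = i
        · subst hp
          rw [if_neg (by omega), if_pos rfl]
          simp
        · have hA : pos + 1 ≤ i ∧ i < pos + 1 + vs.length := by omega
          rw [if_pos hA, if_neg hp]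
          have e : i - pos = i - (pos + 1) + 1 := by omega
          rw [e]; simp
      · rw [if_neg hC, if_neg (by omega), if_neg (by omega)]

theorem foldl_modify_range {α : Type} (f : Nat → α → α) (g : List α) : ∀ (n : Nat),
    (List.range n).foldl (fun g' r => g'.modify r (f r)) g
      = g.mapIdx (fun i x => if i < n then f i x else x) := by
  intro n
  induction n with
  | zero =>
    simp only [List.range_zero, List.foldl_nil]
    symm; apply mapIdx_id'
    intro i hi; rw [if_neg (by omega)]
  | succ n ih =>
    rw [List.range_succ, List.foldl_append, ih]
    simp only [List.foldl_cons, List.foldl_nil]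
    apply List.ext_getElem
    · simp
    · intro i h1 h2
      simp only [List.getElem_modify, List.getElem_mapIdx]
      rcases Nat.lt_trichotomy i n with h | h | h
      · rw [if_neg (by omega), if_pos h, if_pos (by omega)]
      · subst h
        rw [if_pos rfl, if_neg (by omega), if_pos (by omega)]
      · rw [if_neg (by omega), if_neg (by omega), if_neg (by omega)]

theorem foldl_mapIdx {α : Type} (cs : List Nat) (F : Nat → Nat → α → α) : ∀ (g : List α),
    cs.foldl (fun g c => g.mapIdx (fun r row => F c r row)) g
      = g.mapIdx (fun r row => cs.foldl (fun row c => F c r row) row) := by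
  induction cs with
  | nil =>
    intro g
    simp only [List.foldl_nil]
    symm; apply mapIdx_id'
    intro i hi; rfl
  | cons c cs ih =>
    intro g
    simp only [List.foldl_cons]
    rw [ih]
    apply List.ext_getElem
    · simp
    · intro i h1 h2
      simp only [List.getElem_mapIdx]

theorem foldl_ite_set_length (v : Nat → Int) (Q : Nat → Prop) [DecidablePred Q] (n : Nat) :
    ∀ (row : List Int),
    ((List.range n).foldl (fun row c => if Q c then row.set c (v c) else row) row).length
      = row.length := by
  induction n with
  | zero => intro row; simp
  | succ n ih =>
    intro row
    rw [List.range_succ, List.foldl_append]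
    simp only [List.foldl_cons, List.foldl_nil]
    by_cases h : Q n
    · rw [if_pos h]; simp [ih]
    · rw [if_neg h]; exact ih row

theorem foldl_ite_set_getElem? (v : Nat → Int) (Q : Nat → Prop) [DecidablePred Q] (n : Nat) :
    ∀ (row : List Int) (j : Nat),
    ((List.range n).foldl (fun row c => if Q c then row.set c (v c) else row) row)[j]?
      = if j < n ∧ Q j then (if j < row.length then some (v j) else row[j]?) else row[j]? := by
  induction n with
  | zero => intro row j; rw [if_neg (by omega)]; simp
  | succ n ih =>
    intro row j
    rw [List.range_succ, List.foldl_append]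
    simp only [List.foldl_cons, List.foldl_nil]
    by_cases hq : Q n
    · rw [if_pos hq, List.getElem?_set, foldl_ite_set_length, ih]
      by_cases hnj : n = j
      · subst hnj
        rw [if_pos rfl, if_pos (show n < n + 1 ∧ Q n from ⟨by omega, hq⟩)]
        by_cases hl : n < row.length
        · rw [if_pos hl, if_pos hl]
        · rw [if_neg hl, if_neg hl, List.getElem?_eq_none (by omega)]
      · rw [if_neg hnj]
        exact if_congr (Iff.intro (fun ⟨a, b⟩ => ⟨by omega, b⟩) (fun ⟨a, b⟩ => ⟨by omega, b⟩)) rfl rfl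
    · rw [if_neg hq, ih]
      refine if_congr (Iff.intro (fun hab => ⟨by omega, hab.2⟩) (fun hab => ⟨?_, hab.2⟩)) rfl rfl
      rcases Nat.lt_or_ge j n with h | h
      · exact h
      · exfalso
        exact hq ((show j = n by omega) ▸ hab.2)

theorem slideB_length (bg : Int) (l : List Int) : (slideB bg l).length = l.length := by
  have := List.length_filter_le (fun v => v != bg) l
  simp [slideB]; omega

theorem slide_rev_rev (bg : Int) (l : List Int) :
    (slideB bg l.reverse).reverse
      = List.replicate (l.length - (l.filter (fun v => v != bg)).length) bg
          ++ l.filter (fun v => v != bg) := by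
  simp [slideB, List.filter_reverse]

theorem foldl_ite_set_replicate (v : Nat → Int) (Q : Nat → Prop) [DecidablePred Q] (n : Nat) (bg : Int) :
    (List.range n).foldl (fun row c => if Q c then row.set c (v c) else row) (List.replicate n bg)
      = (List.range n).map (fun c => if Q c then v c else bg) := by
  apply List.ext_getElem
  · simp [foldl_ite_set_length]
  · intro j h1 h2
    have hj : j < n := by simpa using h2
    have h := foldl_ite_set_getElem? v Q n (List.replicate n bg) j
    rw [List.getElem?_eq_getElem (by rw [foldl_ite_set_length]; simpa using hj)] at h
    simp only [List.length_replicate, List.getElem?_replicate, if_pos hj] at h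
    simp only [List.getElem_map, List.getElem_range]
    by_cases hq : Q j
    · rw [if_pos (⟨hj, hq⟩ : j < n ∧ Q j)] at h
      rw [if_pos hq]
      exact Option.some_inj.mp h
    · rw [if_neg (fun hc => hq hc.2)] at h
      rw [if_neg hq]
      exact Option.some_inj.mp h

theorem mapIdx_replicate {α β : Type} (f : Nat → α → β) (n : Nat) (x : α) :
    (List.replicate n x).mapIdx f = (List.range n).map (fun i => f i x) := by
  apply List.ext_getElem
  · simp
  · intro j h1 h2
    simp only [List.getElem_mapIdx, List.getElem_replicate, List.getElem_map, List.getElem_range]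

theorem down_case (inp : List (List Int))
    (hhd : inp.headD [] ≠ []) :
    apply_gravity_dir inp "down" = apply_gravity_dir_alt inp "down" := by
  simp only [apply_gravity_dir, apply_gravity_dir_alt]
  rw [if_pos (by decide), if_neg (by decide), if_neg (by decide), if_neg (by decide),
    if_pos (by decide)]
  generalize (backgroundA inp).getD 0 = bg
  have hcols : (inp.headD []).length = colsOf inp := (colsOf_eq inp).symm
  have hcolpos : 0 < colsOf inp := by rw [← hcols]; exact List.length_pos_iff.mpr hhd
  have hnb : ∀ c : Nat, List.map (fun r => (inp.getD r []).getD c 0) (List.range inp.length)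
      = inp.map (fun row => row.getD c 0) :=
    fun c => map_getD_range_comp inp [] (fun row => row.getD c 0)
  have hk : ∀ c : Nat,
      ((inp.map (fun row => row.getD c 0)).filter (fun v => v != bg)).length ≤ inp.length := by
    intro c
    calc ((inp.map (fun row => row.getD c 0)).filter (fun v => v != bg)).length
        ≤ (inp.map (fun row => row.getD c 0)).length := List.length_filter_le _ _
      _ = inp.length := by simp
  simp only [hnb, setCol_eq, transposeB, List.map_map]
  rw [foldl_mapIdx, mapIdx_replicate]
  have hB1 : colsOf (List.map
        ((fun col => (slideB bg col.reverse).reverse) ∘ fun c => List.map (fun row => row.getD c 0) inp)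
        (List.range (colsOf inp))) = inp.length := by
    rw [colsOf_map_range _ hcolpos]
    simp [slideB_length]
  rw [hB1]
  apply List.map_inj_left.mpr
  intro r hr
  have hrn : r < inp.length := by simpa using hr
  rw [foldl_ite_set_replicate]
  apply List.map_inj_left.mpr
  intro c hc
  have hcn : c < colsOf inp := by simpa using hc
  simp only [Function.comp]
  rw [slide_rev_rev]
  have hlen : (List.map (fun row => row.getD c 0) inp).length = inp.length := by simp
  rw [hlen]
  have hkc := hk c
  set kept := (inp.map (fun row => row.getD c 0)).filter (fun v => v != bg) with hkept
  by_cases hlt : r < inp.length - kept.length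
  · rw [if_neg (by omega), List.getD_append _ _ _ _ (by simpa using hlt),
      List.getD_replicate bg hlt]
  · rw [if_pos (⟨by omega, by omega⟩ : inp.length - kept.length ≤ r ∧ r < inp.length - kept.length + kept.length),
      List.getD_append_right _ _ _ _ (by simpa using hlt)]
    simp

theorem up_case (inp : List (List Int))
    (hhd : inp.headD [] ≠ []) :
    apply_gravity_dir inp "up" = apply_gravity_dir_alt inp "up" := by
  simp only [apply_gravity_dir, apply_gravity_dir_alt]
  rw [if_neg (by decide), if_pos (by decide), if_neg (by decide), if_neg (by decide),
    if_pos (by decide)]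
  generalize (backgroundA inp).getD 0 = bg
  have hcols : (inp.headD []).length = colsOf inp := (colsOf_eq inp).symm
  have hcolpos : 0 < colsOf inp := by rw [← hcols]; exact List.length_pos_iff.mpr hhd
  have hnb : ∀ c : Nat, List.map (fun r => (inp.getD r []).getD c 0) (List.range inp.length)
      = inp.map (fun row => row.getD c 0) :=
    fun c => map_getD_range_comp inp [] (fun row => row.getD c 0)
  have hk : ∀ c : Nat,
      ((inp.map (fun row => row.getD c 0)).filter (fun v => v != bg)).length ≤ inp.length := by
    intro c
    calc ((inp.map (fun row => row.getD c 0)).filter (fun v => v != bg)).length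
        ≤ (inp.map (fun row => row.getD c 0)).length := List.length_filter_le _ _
      _ = inp.length := by simp
  simp only [hnb, setCol_eq, transposeB, List.map_map]
  rw [foldl_mapIdx, mapIdx_replicate]
  have hB1 : colsOf (List.map
        ((fun col => slideB bg col) ∘ fun c => List.map (fun row => row.getD c 0) inp)
        (List.range (colsOf inp))) = inp.length := by
    rw [colsOf_map_range _ hcolpos]
    simp [slideB_length]
  rw [hB1]
  apply List.map_inj_left.mpr
  intro r hr
  have hrn : r < inp.length := by simpa using hr
  rw [foldl_ite_set_replicate]
  apply List.map_inj_left.mpr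
  intro c hc
  simp only [Function.comp, slideB]
  have hlen : (List.map (fun row => row.getD c 0) inp).length = inp.length := by simp
  rw [hlen]
  have hkc := hk c
  set kept := (inp.map (fun row => row.getD c 0)).filter (fun v => v != bg) with hkept
  by_cases hlt : r < kept.length
  · rw [if_pos (⟨by omega, by omega⟩ : 0 ≤ r ∧ r < 0 + kept.length),
      List.getD_append _ _ _ _ hlt]
    simp
  · rw [if_neg (by omega), List.getD_append_right _ _ _ _ (by omega),
      List.getD_replicate bg (by omega)]

theorem left_case (inp : List (List Int))
    (hw : ∀ row ∈ inp, (inp.headD []).length ≤ row.length) :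
    apply_gravity_dir inp "left" = apply_gravity_dir_alt inp "left" := by
  simp only [apply_gravity_dir, apply_gravity_dir_alt]
  rw [if_neg (by decide), if_neg (by decide), if_neg (by decide), if_pos (by decide),
    if_pos (by decide)]
  generalize (backgroundA inp).getD 0 = bg
  have hcols : (inp.headD []).length = colsOf inp := (colsOf_eq inp).symm
  rw [foldl_modify_range, mapIdx_replicate,
    ← map_getD_range_comp inp []
      (fun row => slideB bg (PySem.List.slice row none (some ((colsOf inp : Nat) : Int))))]
  apply List.map_inj_left.mpr
  intro r hr
  have hrn : r < inp.length := by simpa using hr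
  rw [if_pos hrn]
  have hget : inp.getD r [] = inp[r] := List.getD_eq_getElem _ _ hrn
  have hrow : colsOf inp ≤ (inp.getD r []).length := by
    rw [hget, ← hcols]; exact hw _ (List.getElem_mem hrn)
  rw [PySem.List.slice_to_natCast, map_getD_range_take _ _ _ hrow]
  set kept := ((inp.getD r []).take (colsOf inp)).filter (fun v => v != bg) with hkept
  have htl : ((inp.getD r []).take (colsOf inp)).length = colsOf inp := by
    rw [List.length_take]; omega
  have hkc : kept.length ≤ colsOf inp := by
    rw [hkept]
    exact le_trans (List.length_filter_le _ _) (le_of_eq htl)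
  rw [setRun_eq _ _ _ (by simp; omega)]
  simp only [slideB, htl, List.take_zero, List.nil_append, Nat.zero_add,
    List.drop_replicate]
  rw [← hkept]

theorem right_case (inp : List (List Int))
    (hw : ∀ row ∈ inp, (inp.headD []).length ≤ row.length) :
    apply_gravity_dir inp "right" = apply_gravity_dir_alt inp "right" := by
  simp only [apply_gravity_dir, apply_gravity_dir_alt]
  rw [if_neg (by decide), if_neg (by decide), if_pos (by decide), if_neg (by decide),
    if_pos (by decide)]
  generalize (backgroundA inp).getD 0 = bg
  have hcols : (inp.headD []).length = colsOf inp := (colsOf_eq inp).symm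
  rw [foldl_modify_range, mapIdx_replicate,
    ← map_getD_range_comp inp []
      (fun row => (slideB bg (PySem.List.slice row none (some ((colsOf inp : Nat) : Int))).reverse).reverse)]
  apply List.map_inj_left.mpr
  intro r hr
  have hrn : r < inp.length := by simpa using hr
  rw [if_pos hrn]
  have hget : inp.getD r [] = inp[r] := List.getD_eq_getElem _ _ hrn
  have hrow : colsOf inp ≤ (inp.getD r []).length := by
    rw [hget, ← hcols]; exact hw _ (List.getElem_mem hrn)
  rw [PySem.List.slice_to_natCast, map_getD_range_take _ _ _ hrow, slide_rev_rev]
  set kept := ((inp.getD r []).take (colsOf inp)).filter (fun v => v != bg) with hkept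
  have htl : ((inp.getD r []).take (colsOf inp)).length = colsOf inp := by
    rw [List.length_take]; omega
  have hkc : kept.length ≤ colsOf inp := by
    rw [hkept]
    exact le_trans (List.length_filter_le _ _) (le_of_eq htl)
  rw [setRun_eq _ _ _ (by simp; omega), htl]
  rw [List.take_replicate, List.drop_replicate]
  have e1 : min (colsOf inp - kept.length) (colsOf inp) = colsOf inp - kept.length := by omega
  have e2 : colsOf inp - (colsOf inp - kept.length + kept.length) = 0 := by omega
  rw [e1, e2]
  simp

theorem other_case (inp : List (List Int)) (direction : String)
    (h1 : direction ≠ "down") (h2 : direction ≠ "up")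
    (h3 : direction ≠ "right") (h4 : direction ≠ "left") :
    apply_gravity_dir inp direction = apply_gravity_dir_alt inp direction := by
  simp only [apply_gravity_dir, apply_gravity_dir_alt, beq_iff_eq,
    if_neg h1, if_neg h2, if_neg h3, if_neg h4]
  apply List.ext_getElem
  · simp
  · intro r hr1 hr2
    simp

-- ===== VERDICT (by name: the statement is the Claim_ definition above) =====
theorem apply_gravity_dir_spec : Claim_equal_apply_gravity_dir := by
  intro inp direction _hdom hpre
  obtain ⟨hne, hcell, hfour, hhd⟩ := hpre
  unfold Spec_apply_gravity_dir
  by_cases h1 : direction = "down"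
  · subst h1; exact down_case inp (hhd (Or.inl rfl))
  by_cases h2 : direction = "up"
  · subst h2; exact up_case inp (hhd (Or.inr rfl))
  by_cases h3 : direction = "right"
  · subst h3; exact right_case inp (hfour (by simp))
  by_cases h4 : direction = "left"
  · subst h4; exact left_case inp (hfour (by simp))
  exact other_case inp direction h1 h2 h3 h4
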